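-- pv_equiv track=rewrite | github.com/zhangchi0923/drbrain | platform/head_move/utils/EyeScreen.py | sectionSplit2
-- ===== SOURCE A (Python) =====
-- def sectionSplit2(myList1,myList2):
--     """
--     find a list of index when state changed according two variables
--
--     Parameters
--     ----------
--     myList1 : list, a sequence of states variable A
--     myList2 : list, a sequence of states variable B
--
--     Returns
--     -------
--     rec :     list, list of index
--
--     Example
--     -------
--     >>> sectionSplit2([0,0,0,1,1],['a','b','b','b','b'])
--     [0,1,3,5]
--     """
--     rec = [0]
--     n = len(myList1)
--     for i in range(1,n):
--         if (myList1[i] != myList1[i-1]) | (myList2[i] != myList2[i-1]) :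
--             onset = i
--             rec.append(onset)
--     rec.append(n)
--     return rec
-- ===== SOURCE B (Python) =====
-- def sectionSplit2(myList1, myList2):
--     n = len(myList1)
--     changesA = {i for i in range(1, n) if myList1[i] != myList1[i-1]}
--     changesB = {i for i in range(1, n) if myList2[i] != myList2[i-1]}
--     return [0] + sorted(changesA | changesB) + [n]
-- ===== Notes on version B (the rewrite author's own statement) =====
-- stated objective: alternative
-- what changed: B computes the change indices of each state sequence separately as two sets and returns the sorted union bracketed by 0 and n, instead of A's single loop appending indices where the combined per-index condition fires.
import Mathlib
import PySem

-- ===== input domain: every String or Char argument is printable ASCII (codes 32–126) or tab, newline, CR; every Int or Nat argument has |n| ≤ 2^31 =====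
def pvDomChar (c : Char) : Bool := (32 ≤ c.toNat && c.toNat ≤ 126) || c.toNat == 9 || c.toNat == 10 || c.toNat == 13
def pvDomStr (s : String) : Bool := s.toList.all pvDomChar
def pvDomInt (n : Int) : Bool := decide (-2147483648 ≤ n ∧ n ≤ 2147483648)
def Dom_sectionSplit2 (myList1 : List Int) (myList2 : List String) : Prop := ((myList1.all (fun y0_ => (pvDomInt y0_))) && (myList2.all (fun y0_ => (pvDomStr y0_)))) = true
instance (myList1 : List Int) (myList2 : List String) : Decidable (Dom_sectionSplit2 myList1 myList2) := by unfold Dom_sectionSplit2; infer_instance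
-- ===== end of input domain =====

-- B computes each sequence's change-index set separately and returns the sorted union
-- bracketed by 0 and n (objective: alternative decomposition, same cost); equivalence on return values.

-- ===== PORT A =====
def sectionSplit2 (myList1 : List Int) (myList2 : List String) : List Int :=
  let n : Int := myList1.length
  let recL := (PySem.List.pyRange 1 n 1).foldl (fun recL i =>
    if PySem.List.pyGetD myList1 i 0 ≠ PySem.List.pyGetD myList1 (i-1) 0
        ∨ PySem.List.pyGetD myList2 i "" ≠ PySem.List.pyGetD myList2 (i-1) "" then
      recL ++ [i]
    else recL) [0]
  recL ++ [n]

-- ===== PORT B =====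
def sectionSplit2_alt (myList1 : List Int) (myList2 : List String) : List Int :=
  let n : Int := myList1.length
  let changesA : PySem.Set Int := PySem.Set.ofList
    ((PySem.List.pyRange 1 n 1).filter
      (fun i => decide (PySem.List.pyGetD myList1 i 0 ≠ PySem.List.pyGetD myList1 (i-1) 0)))
  let changesB : PySem.Set Int := PySem.Set.ofList
    ((PySem.List.pyRange 1 n 1).filter
      (fun i => decide (PySem.List.pyGetD myList2 i "" ≠ PySem.List.pyGetD myList2 (i-1) "")))
  [0] ++ PySem.List.sorted (PySem.Set.union changesA changesB) (fun x => x) false ++ [n]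

-- ===== PRECONDITION & SPEC =====
-- Pre_ excludes exactly the inputs where both Pythons raise IndexError: myList2
-- shorter than a myList1 of length ≥ 2 (both programs read myList2[i] for 1 ≤ i < len(myList1)).
def Pre_sectionSplit2 (myList1 : List Int) (myList2 : List String) : Prop :=
  myList1.length ≤ 1 ∨ myList1.length ≤ myList2.length
instance (myList1 : List Int) (myList2 : List String) : Decidable (Pre_sectionSplit2 myList1 myList2) := by unfold Pre_sectionSplit2; infer_instance

def pvWitness_sectionSplit2 : List Int × List String := ([0, 0, 1], ["a", "b", "b"])

def Spec_sectionSplit2 (myList1 : List Int) (myList2 : List String) (out : List Int) : Prop := out = sectionSplit2_alt myList1 myList2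
instance (myList1 : List Int) (myList2 : List String) (out : List Int) : Decidable (Spec_sectionSplit2 myList1 myList2 out) := by unfold Spec_sectionSplit2; infer_instance

-- ===== CLAIM =====
def Claim_equal_sectionSplit2 : Prop := ∀ (myList1 : List Int) (myList2 : List String), Dom_sectionSplit2 myList1 myList2 → Pre_sectionSplit2 myList1 myList2 → Spec_sectionSplit2 myList1 myList2 (sectionSplit2 myList1 myList2)

-- ===== LEMMAS AND PROOFS =====

-- the sorted union of the two change sets is the filter of the combined condition
theorem pv_sorted_union_eq_filter (p q : Int → Prop) [DecidablePred p] [DecidablePred q]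
    (a b : Int) :
    PySem.List.sorted
      (PySem.Set.union
        (PySem.Set.ofList ((PySem.List.pyRange a b 1).filter (fun i => decide (p i))))
        (PySem.Set.ofList ((PySem.List.pyRange a b 1).filter (fun i => decide (q i)))))
      (fun x => x) false
      = (PySem.List.pyRange a b 1).filter (fun i => decide (p i ∨ q i)) := by
  apply PySem.List.sorted_eq_of_perm_of_pairwise_lt
  · apply (List.perm_ext_iff_of_nodup _ _).mpr
    · intro x
      simp only [PySem.Set.mem_union, PySem.Set.mem_ofList, List.mem_filter,
        decide_eq_true_eq]
      tauto
    · exact List.Nodup.filter _ (PySem.List.nodup_pyRange_one a b)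
    · exact PySem.Set.nodup_union _ _ (PySem.Set.nodup_ofList _)
  · exact List.Pairwise.filter _ (PySem.List.pairwise_lt_pyRange_one a b)

-- ===== VERDICT =====
theorem sectionSplit2_spec : Claim_equal_sectionSplit2 := by
  intro l1 l2 _ _
  show sectionSplit2 l1 l2 = sectionSplit2_alt l1 l2
  simp only [sectionSplit2, sectionSplit2_alt]
  rw [PySem.List.foldl_append_ite_eq_filter, pv_sorted_union_eq_filter]
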